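-- pv_equiv track=rewrite | github.com/MrBrantCode/unitest_baseline | mut_generate/mist_train_cf/cf_19455/solution.py | is_isogram
-- ===== SOURCE A (Python) =====
-- def is_isogram(s):
--     checker = 0
--     s = s.lower()
--     for ch in s:
--         diff = ord(ch) - ord('a')
--         if diff < 0 or diff > 25:
--             continue
--         if (checker & (1 << diff)) != 0:
--             return False
--         checker |= (1 << diff)
--     return True
-- ===== SOURCE B (Python) =====
-- def is_isogram(s):
--     letters = [c for c in s.lower() if 'a' <= c <= 'z']
--     return len(letters) == len(set(letters))
-- ===== Notes on version B (the rewrite author's own statement) =====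
-- stated objective: simpler
-- what changed: Replaces the running bitmask with per-character early exit by a build-then-count decomposition: collect the lowercase a-z letters, then compare the count with the number of distinct letters via a set.
import Mathlib
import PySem

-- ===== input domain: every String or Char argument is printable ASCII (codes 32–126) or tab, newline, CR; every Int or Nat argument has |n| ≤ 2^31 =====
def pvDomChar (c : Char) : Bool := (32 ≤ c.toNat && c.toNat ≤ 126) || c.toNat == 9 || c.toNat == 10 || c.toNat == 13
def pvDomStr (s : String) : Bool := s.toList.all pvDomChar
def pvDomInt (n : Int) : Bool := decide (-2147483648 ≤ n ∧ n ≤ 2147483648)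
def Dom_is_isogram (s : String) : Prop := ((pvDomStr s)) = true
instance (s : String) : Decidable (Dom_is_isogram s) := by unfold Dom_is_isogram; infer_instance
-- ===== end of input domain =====

-- ===== PORT A =====
-- B replaces A's running bitmask and early exit by collecting the a-z letters and
-- comparing their count with the number of distinct letters (objective: simpler).
-- A's loop over the lowercased string; checker is the Python int bitmask (always ≥ 0, so Nat).
def isogramLoop : List Char → Nat → Bool
  | [], _ => true
  | ch :: rest, checker =>
    let diff : Int := (ch.toNat : Int) - 97
    if diff < 0 || diff > 25 then isogramLoop rest checker
    else if checker &&& (1 <<< diff.toNat) != 0 then false  -- diff ∈ [0,25] here, so `.toNat` is exact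
    else isogramLoop rest (checker ||| (1 <<< diff.toNat))

def is_isogram (s : String) : Bool := isogramLoop (PySem.Str.lower s).toList 0

-- ===== PORT B =====
def is_isogram_alt (s : String) : Bool :=
  let letters := (PySem.Str.lower s).toList.filter (fun c => decide ('a' ≤ c) && decide (c ≤ 'z'))
  (letters.length : Int) == PySem.Set.len (PySem.Set.ofList letters)

-- ===== PRECONDITION & SPEC =====
def Spec_is_isogram (s : String) (out : Bool) : Prop := out = is_isogram_alt s
instance (s : String) (out : Bool) : Decidable (Spec_is_isogram s out) := by unfold Spec_is_isogram; infer_instance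

-- ===== CLAIM (what is proved, stated in full; the proofs are below) =====
def Claim_equal_is_isogram : Prop := ∀ (s : String), Dom_is_isogram s → Spec_is_isogram s (is_isogram s)

-- ===== LEMMAS AND PROOFS =====

lemma letter_toNat (c : Char) :
    (decide ('a' ≤ c) && decide (c ≤ 'z')) = true ↔ 97 ≤ c.toNat ∧ c.toNat ≤ 122 := by
  simp only [Bool.and_eq_true, decide_eq_true_iff, Char.le_def, UInt32.le_iff_toNat_le,
    Char.toNat_val]
  exact Iff.rfl

lemma char_toNat_inj {c d : Char} (h : c.toNat = d.toNat) : c = d := by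
  apply Char.ext
  exact UInt32.toNat_inj.mp h

lemma isogramLoop_true_iff (cs : List Char) (k : Nat) :
    isogramLoop cs k = true ↔
      (cs.filter (fun c => decide ('a' ≤ c) && decide (c ≤ 'z'))).Nodup ∧
      ∀ c ∈ cs.filter (fun c => decide ('a' ≤ c) && decide (c ≤ 'z')),
        k.testBit (c.toNat - 97) = false := by
  induction cs generalizing k with
  | nil => simp [isogramLoop]
  | cons c cs ih =>
    by_cases hc : (decide ('a' ≤ c) && decide (c ≤ 'z')) = true
    · have hrange : 97 ≤ c.toNat ∧ c.toNat ≤ 122 := (letter_toNat c).mp hc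
      have hdiff : ¬((c.toNat : Int) - 97 < 0 || (c.toNat : Int) - 97 > 25) = true := by
        simp; omega
      have htoNat : ((c.toNat : Int) - 97).toNat = c.toNat - 97 := by omega
      rw [List.filter_cons, if_pos hc]
      by_cases hb : k.testBit (c.toNat - 97) = true
      · have hand : (k &&& (1 <<< (c.toNat - 97)) != 0) = true := by
          rw [Nat.one_shiftLeft, Nat.and_two_pow, hb]
          simp [(Nat.two_pow_pos (c.toNat - 97)).ne']
        simp only [isogramLoop, hdiff, htoNat, hand, if_true]
        constructor
        · intro h; exact absurd h (by simp)
        · rintro ⟨-, hall⟩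
          have := hall c (List.mem_cons_self ..)
          rw [hb] at this; exact absurd this (by simp)
      · have hand : (k &&& (1 <<< (c.toNat - 97)) != 0) = false := by
          rw [Nat.one_shiftLeft, Nat.and_two_pow]
          simp only [Bool.not_eq_true] at hb
          simp [Bool.toNat, hb]
        simp only [isogramLoop, hdiff, htoNat, hand]
        simp only [Bool.false_eq_true, if_false]
        rw [ih]
        have hor : ∀ x : Char, (k ||| (1 <<< (c.toNat - 97))).testBit (x.toNat - 97) = false ↔
            k.testBit (x.toNat - 97) = false ∧ c.toNat - 97 ≠ x.toNat - 97 := by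
          intro x
          rw [Nat.one_shiftLeft, Nat.testBit_or, Nat.testBit_two_pow]
          simp
        constructor
        · rintro ⟨hnd, hall⟩
          have hcnot : c ∉ List.filter (fun c => decide ('a' ≤ c) && decide (c ≤ 'z')) cs := by
            intro hmem
            have hx := hall c hmem
            rw [hor] at hx
            exact hx.2 rfl
          refine ⟨List.nodup_cons.mpr ⟨hcnot, hnd⟩, ?_⟩
          intro x hx
          rcases List.mem_cons.mp hx with rfl | hx'
          · simpa using hb
          · exact ((hor x).mp (hall x hx')).1
        · rintro ⟨hnd, hall⟩
          rw [List.nodup_cons] at hnd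
          refine ⟨hnd.2, ?_⟩
          intro x hx
          rw [hor]
          refine ⟨hall x (List.mem_cons_of_mem _ hx), ?_⟩
          intro heq
          have hxr : 97 ≤ x.toNat ∧ x.toNat ≤ 122 :=
            (letter_toNat x).mp (List.mem_filter.mp hx).2
          have hcx : c = x := char_toNat_inj (by omega)
          exact hnd.1 (hcx ▸ hx)
    · rw [List.filter_cons, if_neg hc]
      have hdiff : ((c.toNat : Int) - 97 < 0 || (c.toNat : Int) - 97 > 25) = true := by
        rw [letter_toNat] at hc
        simp; omega
      simp only [isogramLoop, hdiff, if_true]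
      exact ih k

-- If x ∈ s then discarding x from a nodup set strictly shrinks it.
lemma length_discard_lt {α : Type} [BEq α] [LawfulBEq α] (s : PySem.Set α) (x : α)
    (hx : x ∈ s) : (PySem.Set.discard s x).length < s.length := by
  simp only [PySem.Set.discard]
  rw [List.length_filter_lt_length_iff_exists]
  exact ⟨x, hx, by simp⟩

lemma length_ofList_eq_iff {α : Type} [BEq α] [LawfulBEq α] (xs : List α) :
    (PySem.Set.ofList xs).length = xs.length ↔ xs.Nodup := by
  constructor
  · intro h
    induction xs with
    | nil => simp
    | cons x xs ih =>
      rw [PySem.Set.ofList_cons] at h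
      simp only [List.length_cons] at h
      by_cases hx : x ∈ xs
      · exfalso
        have hlt := length_discard_lt (PySem.Set.ofList xs) x
          ((PySem.Set.mem_ofList xs x).mpr hx)
        have hle := PySem.Set.length_ofList_le xs
        omega
      · have hle1 : ((PySem.Set.ofList xs).discard x).length ≤ (PySem.Set.ofList xs).length := by
          simp only [PySem.Set.discard]
          exact List.length_filter_le ..
        have hle := PySem.Set.length_ofList_le xs
        rw [List.nodup_cons]
        exact ⟨hx, ih (by omega)⟩
  · intro h
    rw [PySem.Set.ofList_eq_self_of_nodup xs h]

lemma alt_true_iff (s : String) :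
    is_isogram_alt s = true ↔
      ((PySem.Str.lower s).toList.filter (fun c => decide ('a' ≤ c) && decide (c ≤ 'z'))).Nodup := by
  unfold is_isogram_alt
  simp only [PySem.Set.len, beq_iff_eq, Int.natCast_inj]
  rw [eq_comm, length_ofList_eq_iff]

-- ===== VERDICT (by name: the statement is the Claim_ definition above) =====
theorem is_isogram_spec : Claim_equal_is_isogram := by
  intro s _
  unfold Spec_is_isogram
  rw [Bool.eq_iff_iff, alt_true_iff]
  unfold is_isogram
  rw [isogramLoop_true_iff]
  simp [Nat.zero_testBit]
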